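-- pv_equiv track=rewrite | github.com/VladislaV7V/lesson_4_introduction_to_the_Python_language_Home_work | Ex_24/Ex_24.py | sborYagod
-- ===== SOURCE A (Python) =====
-- def sborYagod(collection):
--     count = int(len(collection)//3)
--     resList = []
--     for i in range (0, count*3, 3):
--             resList.append(collection[i] + collection[i+1] + collection[i+2])
--     if len(collection)%3 == 2:
--         resList.append(collection[-1] + collection[-2])
--     elif len(collection)%3 == 1:
--         resList.append(collection[-1])
--     print (resList)
--     return resList
-- ===== SOURCE B (Python) =====
-- def sborYagod(collection):
--     resList = []
--     it = iter(collection)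
--     for a in it:
--         b = next(it, None)
--         c = next(it, None)
--         if c is not None:
--             resList.append(a + b + c)
--         elif b is not None:
--             resList.append(a + b)
--         else:
--             resList.append(a)
--     print(resList)
--     return resList
-- ===== Notes on version B (the rewrite author's own statement) =====
-- stated objective: idiomatic
-- what changed: Replaced the index-arithmetic loop over range(0, count*3, 3) plus len%3 negative-index tail cases by a single pass over one iterator that pulls up to three elements per group, handling full groups and the short tail uniformly.
import Mathlib
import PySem

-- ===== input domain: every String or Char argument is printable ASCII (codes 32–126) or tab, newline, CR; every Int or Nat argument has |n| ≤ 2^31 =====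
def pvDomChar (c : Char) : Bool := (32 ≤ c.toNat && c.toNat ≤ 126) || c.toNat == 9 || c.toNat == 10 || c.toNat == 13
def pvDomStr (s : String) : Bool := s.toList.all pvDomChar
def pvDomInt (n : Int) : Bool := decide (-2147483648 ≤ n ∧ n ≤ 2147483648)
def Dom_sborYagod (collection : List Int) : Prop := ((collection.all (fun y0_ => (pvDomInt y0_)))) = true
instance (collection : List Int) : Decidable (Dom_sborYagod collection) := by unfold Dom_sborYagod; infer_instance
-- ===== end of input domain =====

-- B replaces A's index-arithmetic loop and len%3 negative-index tail cases by one idiomatic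
-- pass over a single iterator taking up to three elements per group (ported as structural
-- recursion); equivalence is about the return value — both programs also print the result,
-- a side effect not modelled here.

-- ===== PORT A =====
def sborYagod (collection : List Int) : List Int :=
  let count : Int := PySem.Int.floordiv (PySem.List.len collection) 3
  -- loop-body indexes are always in range, so pyGetD is exact here
  let resList : List Int :=
    (PySem.List.pyRange 0 (count * 3) 3).foldl
      (fun acc i =>
        acc ++ [PySem.List.pyGetD collection i 0 + PySem.List.pyGetD collection (i + 1) 0
                  + PySem.List.pyGetD collection (i + 2) 0]) []
  let resList :=
    if PySem.Int.mod (PySem.List.len collection) 3 = 2 then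
      resList ++ [PySem.List.pyGetD collection (-1) 0 + PySem.List.pyGetD collection (-2) 0]
    else if PySem.Int.mod (PySem.List.len collection) 3 = 1 then
      resList ++ [PySem.List.pyGetD collection (-1) 0]
    else resList
  resList

-- ===== PORT B =====
def sborYagodGo : List Int → List Int
  | a :: b :: c :: rest => (a + b + c) :: sborYagodGo rest
  | [a, b] => [a + b]
  | [a] => [a]
  | [] => []

def sborYagod_alt (collection : List Int) : List Int :=
  sborYagodGo collection

-- ===== PRECONDITION & SPEC =====
def Spec_sborYagod (collection : List Int) (out : List Int) : Prop := out = sborYagod_alt collection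
instance (collection : List Int) (out : List Int) : Decidable (Spec_sborYagod collection out) := by unfold Spec_sborYagod; infer_instance

-- ===== CLAIM (what is proved, stated in full; the proofs are below) =====
def Claim_equal_sborYagod : Prop := ∀ (collection : List Int), Dom_sborYagod collection → Spec_sborYagod collection (sborYagod collection)

-- ===== LEMMAS AND PROOFS =====

-- the full-triple part of A's loop, as a map over Nat indices
def pvChunk (xs : List Int) : List Int :=
  (List.range (xs.length / 3)).map
    (fun k => xs.getD (3*k) 0 + xs.getD (3*k+1) 0 + xs.getD (3*k+2) 0)

theorem pvLoop_eq (xs : List Int) :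
    (PySem.List.pyRange 0 (PySem.Int.floordiv (PySem.List.len xs) 3 * 3) 3).foldl
      (fun acc i =>
        acc ++ [PySem.List.pyGetD xs i 0 + PySem.List.pyGetD xs (i + 1) 0
                  + PySem.List.pyGetD xs (i + 2) 0]) []
    = pvChunk xs := by
  rw [PySem.List.foldl_append_singleton_eq_map]
  rw [PySem.List.pyRange_of_pos 0 _ (by norm_num)]
  rw [PySem.Int.floordiv_eq_ediv_of_pos (by norm_num)]
  have hcnt : (if (0:Int) < (PySem.List.len xs) / 3 * 3 then
      (((PySem.List.len xs) / 3 * 3 - 0 + 3 - 1) / 3).toNat else 0) = xs.length / 3 := by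
    simp only [PySem.List.len]
    split_ifs with h <;> omega
  rw [hcnt, List.map_map]
  apply List.map_congr_left
  intro k hk
  simp only [Function.comp, zero_add]
  have h1 : (3:Int)*(k:Int) = ((3*k : Nat) : Int) := by push_cast; ring
  have h2 : ((3*k : Nat) : Int) + 1 = ((3*k+1 : Nat) : Int) := by push_cast; ring
  have h3 : ((3*k : Nat) : Int) + 2 = ((3*k+2 : Nat) : Int) := by push_cast; ring
  rw [h1, h2, h3, PySem.List.pyGetD_natCast, PySem.List.pyGetD_natCast, PySem.List.pyGetD_natCast]

theorem pvChunk_cons (a b c : Int) (rest : List Int) :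
    pvChunk (a :: b :: c :: rest) = (a + b + c) :: pvChunk rest := by
  unfold pvChunk
  have hlen : (a :: b :: c :: rest).length / 3 = rest.length / 3 + 1 := by
    simp only [List.length_cons]; omega
  rw [hlen, List.range_succ_eq_map, List.map_cons, List.map_map]
  refine congrArg₂ List.cons (by norm_num) ?_
  apply List.map_congr_left
  intro k hk
  simp only [Function.comp, Nat.succ_eq_add_one]
  rw [show 3*(k+1)+2 = (3*k+2)+1+1+1 from by ring,
      show 3*(k+1)+1 = (3*k+1)+1+1+1 from by ring,
      show 3*(k+1) = (3*k)+1+1+1 from by ring]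
  simp only [List.getD_cons_succ]

theorem pvGetD_neg_cons (x : Int) (xs : List Int) (i : Int)
    (h1 : -(xs.length : Int) ≤ i) (h2 : i < 0) :
    PySem.List.pyGetD (x :: xs) i 0 = PySem.List.pyGetD xs i 0 := by
  simp only [PySem.List.pyGetD, PySem.List.pyGet?, PySem.List.pyIdx?, List.length_cons]
  split_ifs with p1 p2
  all_goals try (exfalso; omega)
  rw [show xs.length + 1 - (-i).toNat = (xs.length - (-i).toNat) + 1 from by omega]
  simp

theorem pvMod (ys : List Int) :
    PySem.Int.mod (PySem.List.len ys) 3 = (ys.length : Int) % 3 := by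
  rw [PySem.Int.mod_eq_emod_of_pos (by norm_num)]
  simp [PySem.List.len]

theorem sborYagod_eq_go (collection : List Int) :
    sborYagod collection = sborYagodGo collection := by
  induction collection using sborYagodGo.induct with
  | case1 a b c rest ih =>
    rw [sborYagodGo, ← ih]
    show sborYagod (a :: b :: c :: rest) = (a + b + c) :: sborYagod rest
    unfold sborYagod
    simp only [pvLoop_eq]
    simp only [pvMod, List.length_cons]
    have hm : ((rest.length : Int) + 1 + 1 + 1) % 3 = (rest.length : Int) % 3 := by omega
    push_cast
    rw [hm, pvChunk_cons]
    split_ifs with h1 h2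
    · have hn : 2 ≤ rest.length := by omega
      rw [pvGetD_neg_cons a _ _ (by simp only [List.length_cons]; push_cast; omega) (by omega),
          pvGetD_neg_cons b _ _ (by simp only [List.length_cons]; push_cast; omega) (by omega),
          pvGetD_neg_cons c _ _ (by omega) (by omega),
          pvGetD_neg_cons a _ _ (by simp only [List.length_cons]; push_cast; omega) (by omega),
          pvGetD_neg_cons b _ _ (by simp only [List.length_cons]; push_cast; omega) (by omega),
          pvGetD_neg_cons c _ _ (by omega) (by omega)]
      simp
    · have hn : 1 ≤ rest.length := by omega
      rw [pvGetD_neg_cons a _ _ (by simp only [List.length_cons]; push_cast; omega) (by omega),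
          pvGetD_neg_cons b _ _ (by simp only [List.length_cons]; push_cast; omega) (by omega),
          pvGetD_neg_cons c _ _ (by omega) (by omega)]
      simp
    · simp
  | case2 a b =>
    show sborYagod [a, b] = [a + b]
    unfold sborYagod
    simp only [pvLoop_eq, pvMod]
    norm_num [pvChunk, PySem.List.pyGetD, PySem.List.pyGet?, PySem.List.pyIdx?]
    ring
  | case3 a =>
    show sborYagod [a] = [a]
    unfold sborYagod
    simp only [pvLoop_eq, pvMod]
    norm_num [pvChunk, PySem.List.pyGetD, PySem.List.pyGet?, PySem.List.pyIdx?]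
  | case4 =>
    rfl

-- ===== VERDICT (by name: the statement is the Claim_ definition above) =====
theorem sborYagod_spec : Claim_equal_sborYagod := by
  intro collection _
  unfold Spec_sborYagod sborYagod_alt
  exact sborYagod_eq_go collection
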